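-- pv_equiv track=rewrite | github.com/McSchnizzle/raspberry-pi | weather_sensehat.py | frame_rain
-- ===== SOURCE A (Python) =====
-- DIM = 0.15
--
-- def d(r, g, b):
--     return [max(0, min(255, int(r * DIM))),
--             max(0, min(255, int(g * DIM))),
--             max(0, min(255, int(b * DIM)))]
--
-- def frame_rain(tick):
--     pixels = [d(15, 18, 30)] * 64
--     for col in range(8):
--         drop_y = (tick + col * 3) % 10
--         if drop_y < 8:
--             pixels[drop_y*8 + col] = d(60, 110, 255)
--             if drop_y > 0:
--                 pixels[(drop_y-1)*8 + col] = d(30, 55, 130)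
--     return pixels
-- ===== SOURCE B (Python) =====
-- DIM = 0.15
--
-- def d(r, g, b):
--     return [max(0, min(255, int(r * DIM))),
--             max(0, min(255, int(g * DIM))),
--             max(0, min(255, int(b * DIM)))]
--
-- def frame_rain(tick):
--     def pixel(row, col):
--         drop_y = (tick + col * 3) % 10
--         if drop_y < 8 and row == drop_y:
--             return d(60, 110, 255)
--         if drop_y < 8 and drop_y > 0 and row == drop_y - 1:
--             return d(30, 55, 130)
--         return d(15, 18, 30)
--     return [pixel(row, col) for row in range(8) for col in range(8)]
-- ===== Notes on version B (the rewrite author's own statement) =====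
-- stated objective: simpler
-- what changed: B computes every pixel of the 8x8 frame directly in one nested row/col comprehension (pixel colour decided per-position from drop_y) instead of prefilling a background list and imperatively overwriting drop pixels.
import Mathlib
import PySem

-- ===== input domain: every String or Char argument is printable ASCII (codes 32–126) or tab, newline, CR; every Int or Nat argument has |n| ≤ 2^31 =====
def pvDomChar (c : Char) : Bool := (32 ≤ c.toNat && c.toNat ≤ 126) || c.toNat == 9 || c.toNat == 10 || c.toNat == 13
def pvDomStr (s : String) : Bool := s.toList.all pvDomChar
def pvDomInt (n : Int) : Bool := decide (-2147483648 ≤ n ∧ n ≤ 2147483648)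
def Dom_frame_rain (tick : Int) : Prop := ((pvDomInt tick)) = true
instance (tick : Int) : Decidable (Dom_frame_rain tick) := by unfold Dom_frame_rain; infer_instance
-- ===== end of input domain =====

-- B computes every pixel of the 8x8 frame directly with one nested comprehension instead of
-- prefilling a background list and overwriting drop pixels (objective: simpler).

-- ===== PORT A =====
-- helper d(r,g,b): int(r*0.15) is ported as (r*15)//100, which is exact for every
-- argument d is called with in this module (nonnegative ints 15..255, where the
-- float product truncates to the same value).
def pvD (r g b : Int) : List Int :=
  [max 0 (min 255 (PySem.Int.floordiv (r * 15) 100)),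
   max 0 (min 255 (PySem.Int.floordiv (g * 15) 100)),
   max 0 (min 255 (PySem.Int.floordiv (b * 15) 100))]

-- pixels[i] = v: the indices drop_y*8+col and (drop_y-1)*8+col are provably in
-- [0,64) whenever assigned (0 ≤ drop_y < 8, 0 ≤ col < 8), so List.set with .toNat is exact.
def frame_rain (tick : Int) : List (List Int) :=
  (PySem.List.pyRange 0 8 1).foldl
    (fun pixels col =>
      let drop_y := PySem.Int.mod (tick + col * 3) 10
      if drop_y < 8 then
        let pixels := pixels.set (drop_y * 8 + col).toNat (pvD 60 110 255)
        if drop_y > 0 then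
          pixels.set ((drop_y - 1) * 8 + col).toNat (pvD 30 55 130)
        else pixels
      else pixels)
    (List.replicate 64 (pvD 15 18 30))

-- ===== PORT B =====
def pvPixel (tick row col : Int) : List Int :=
  let drop_y := PySem.Int.mod (tick + col * 3) 10
  if drop_y < 8 ∧ row = drop_y then pvD 60 110 255
  else if drop_y < 8 ∧ drop_y > 0 ∧ row = drop_y - 1 then pvD 30 55 130
  else pvD 15 18 30

def frame_rain_alt (tick : Int) : List (List Int) :=
  (PySem.List.pyRange 0 8 1).flatMap
    (fun row => (PySem.List.pyRange 0 8 1).map (fun col => pvPixel tick row col))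

-- ===== PRECONDITION & SPEC =====
def Spec_frame_rain (tick : Int) (out : List (List Int)) : Prop := out = frame_rain_alt tick
instance (tick : Int) (out : List (List Int)) : Decidable (Spec_frame_rain tick out) := by unfold Spec_frame_rain; infer_instance

-- ===== CLAIM (what is proved, stated in full; the proofs are below) =====
def Claim_equal_frame_rain : Prop := ∀ (tick : Int), Dom_frame_rain tick → Spec_frame_rain tick (frame_rain tick)

-- ===== LEMMAS AND PROOFS =====

lemma pv_emod_shift (t c : Int) :
    PySem.Int.mod (t % 10 + c) 10 = PySem.Int.mod (t + c) 10 := by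
  rw [PySem.Int.mod_eq_emod_of_pos, PySem.Int.mod_eq_emod_of_pos] <;> omega

lemma pv_range8 : PySem.List.pyRange 0 8 1 = [0, 1, 2, 3, 4, 5, 6, 7] := by decide

lemma frame_rain_mod (tick : Int) : frame_rain tick = frame_rain (tick % 10) := by
  simp only [frame_rain, pv_range8, List.foldl, pv_emod_shift]

lemma frame_rain_alt_mod (tick : Int) :
    frame_rain_alt tick = frame_rain_alt (tick % 10) := by
  simp only [frame_rain_alt, pvPixel, pv_range8, List.flatMap, List.map,
    pv_emod_shift]

-- ===== VERDICT (by name: the statement is the Claim_ definition above) =====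
theorem frame_rain_spec : Claim_equal_frame_rain := by
  intro tick _
  unfold Spec_frame_rain
  rw [frame_rain_mod, frame_rain_alt_mod]
  have h0 : 0 ≤ tick % 10 := by omega
  have h1 : tick % 10 < 10 := by omega
  generalize tick % 10 = r at h0 h1 ⊢
  interval_cases r <;> decide
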